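-- pv_equiv track=rewrite | github.com/SAIMANEESHWAR/ProjectBazaar | lambda/resume_fix_parse.py | _split_experience_blocks
-- ===== SOURCE A (Python) =====
-- from typing import Any
--
-- def _split_experience_blocks(lines: list[str]) -> list[dict[str, Any]]:
--     """Split experience section into job-sized blocks (blank-line separated)."""
--     if not lines:
--         return []
--     blocks: list[list[str]] = []
--     cur: list[str] = []
--     for ln in lines:
--         if not ln.strip():
--             if cur:
--                 blocks.append(cur)
--                 cur = []
--             continue
--         cur.append(ln)
--     if cur:
--         blocks.append(cur)
--
--     out: list[dict[str, Any]] = []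
--     for b in blocks:
--         title = b[0] if b else ""
--         detail = " ".join(b[1:]) if len(b) > 1 else ""
--         out.append({"title": title, "detail": detail})
--     return out
-- ===== SOURCE B (Python) =====
-- def _split_experience_blocks(lines: list[str]) -> list[dict]:
--     """Single fused pass: emit each block's dict as soon as it closes,
--     tracking (title, detail parts) directly instead of collecting blocks first."""
--     out = []
--     title = None
--     parts = []
--     for ln in lines:
--         if ln.strip():
--             if title is None:
--                 title = ln
--             else:
--                 parts.append(ln)
--         elif title is not None:
--             out.append({"title": title, "detail": " ".join(parts)})
--             title, parts = None, []
--     if title is not None: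
--         out.append({"title": title, "detail": " ".join(parts)})
--     return out
-- ===== Notes on version B (the rewrite author's own statement) =====
-- stated objective: simpler
-- what changed: Replaced the two-phase algorithm (accumulate a list of line-blocks, then a second loop slicing each block into title/detail) by one fused pass that tracks the current title and detail lines directly and emits each dict when its block closes.
import Mathlib
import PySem

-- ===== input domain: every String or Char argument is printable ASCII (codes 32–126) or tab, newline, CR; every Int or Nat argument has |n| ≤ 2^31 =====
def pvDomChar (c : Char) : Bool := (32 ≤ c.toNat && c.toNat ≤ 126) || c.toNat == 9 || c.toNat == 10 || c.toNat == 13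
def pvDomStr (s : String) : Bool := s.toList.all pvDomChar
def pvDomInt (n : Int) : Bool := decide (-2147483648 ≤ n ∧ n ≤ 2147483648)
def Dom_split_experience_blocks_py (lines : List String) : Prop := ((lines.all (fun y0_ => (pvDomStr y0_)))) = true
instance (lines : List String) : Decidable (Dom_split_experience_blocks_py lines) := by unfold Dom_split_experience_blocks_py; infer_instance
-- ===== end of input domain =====

-- B replaces A's two-phase accumulate-blocks-then-transform algorithm by one fused pass (simpler; same cost).

-- ===== PORT A =====
-- the dict built in A's second loop: {"title": b[0] if b else "", "detail": " ".join(b[1:]) if len(b) > 1 else ""}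
def pvMkEntryA (b : List String) : List (String × String) :=
  let title := match b with | [] => "" | t :: _ => t
  let detail := if b.length > 1 then PySem.Str.join " " (List.drop 1 b) else ""
  [("title", title), ("detail", detail)]

-- body of A's first loop, state (blocks, cur)
def pvStepA (st : List (List String) × List String) (ln : String) : List (List String) × List String :=
  if PySem.Str.strip ln = "" then
    if st.2 ≠ [] then (st.1 ++ [st.2], ([] : List String)) else st
  else (st.1, st.2 ++ [ln])

-- A's trailing 'if cur: blocks.append(cur)' followed by the second loop
def pvFinA (st : List (List String) × List String) : List (List (String × String)) :=
  (if st.2 ≠ [] then st.1 ++ [st.2] else st.1).map pvMkEntryA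

def split_experience_blocks_py (lines : List String) : List (List (String × String)) :=
  if lines = [] then []
  else pvFinA (lines.foldl pvStepA ([], []))

-- ===== PORT B =====
-- body of B's single fused loop, state (out, title?, parts)
def pvStepB (st : List (List (String × String)) × Option String × List String) (ln : String) :
    List (List (String × String)) × Option String × List String :=
  if PySem.Str.strip ln ≠ "" then
    match st.2.1 with
    | none => (st.1, some ln, st.2.2)
    | some t => (st.1, some t, st.2.2 ++ [ln])
  else
    match st.2.1 with
    | some t => (st.1 ++ [[("title", t), ("detail", PySem.Str.join " " st.2.2)]], none, ([] : List String))
    | none => st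

-- B's trailing 'if title is not None: out.append(…)'
def pvFinB (st : List (List (String × String)) × Option String × List String) :
    List (List (String × String)) :=
  match st.2.1 with
  | some t => st.1 ++ [[("title", t), ("detail", PySem.Str.join " " st.2.2)]]
  | none => st.1

def split_experience_blocks_py_alt (lines : List String) : List (List (String × String)) :=
  pvFinB (lines.foldl pvStepB ([], none, []))

-- ===== PRECONDITION & SPEC =====
def Spec_split_experience_blocks_py (lines : List String) (out : List (List (String × String))) : Prop := out = split_experience_blocks_py_alt lines
instance (lines : List String) (out : List (List (String × String))) : Decidable (Spec_split_experience_blocks_py lines out) := by unfold Spec_split_experience_blocks_py; infer_instance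

-- ===== CLAIM (what is proved, stated in full; the proofs are below) =====
def Claim_equal_split_experience_blocks_py : Prop := ∀ (lines : List String), Dom_split_experience_blocks_py lines → Spec_split_experience_blocks_py lines (split_experience_blocks_py lines)

-- ===== LEMMAS AND PROOFS =====

-- on nonempty blocks, A's entry is [("title", head), ("detail", join " " tail)]
lemma pvMkEntryA_cons (t : String) (rest : List String) :
    pvMkEntryA (t :: rest) = [("title", t), ("detail", PySem.Str.join " " rest)] := by
  rcases rest with _ | ⟨r, rs⟩
  · simp [pvMkEntryA, PySem.Str.join]
  · simp [pvMkEntryA]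

-- state correspondence between the two loops
def pvRel (stA : List (List String) × List String)
    (stB : List (List (String × String)) × Option String × List String) : Prop :=
  stB.1 = stA.1.map pvMkEntryA ∧ stB.2.1 = stA.2.head? ∧ stB.2.2 = stA.2.tail

lemma pvRel_step (stA : List (List String) × List String)
    (stB : List (List (String × String)) × Option String × List String)
    (h : pvRel stA stB) (ln : String) : pvRel (pvStepA stA ln) (pvStepB stB ln) := by
  obtain ⟨h1, h2, h3⟩ := h
  rcases stA with ⟨blocks, cur⟩
  rcases stB with ⟨out, t?, parts⟩
  simp only at h1 h2 h3
  by_cases hs : PySem.Str.strip ln = ""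
  · rcases cur with _ | ⟨c, cs⟩
    · simp_all [pvStepA, pvStepB, pvRel]
    · simp only [List.head?] at h2
      subst h1 h2 h3
      simp [pvStepA, pvStepB, pvRel, hs, pvMkEntryA_cons]
  · rcases cur with _ | ⟨c, cs⟩
    · simp_all [pvStepA, pvStepB, pvRel]
    · simp only [List.head?] at h2
      subst h1 h2 h3
      simp [pvStepA, pvStepB, pvRel, hs]

lemma pvRel_foldl (lines : List String) (stA : List (List String) × List String)
    (stB : List (List (String × String)) × Option String × List String)
    (h : pvRel stA stB) : pvRel (lines.foldl pvStepA stA) (lines.foldl pvStepB stB) := by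
  induction lines generalizing stA stB with
  | nil => simpa using h
  | cons ln rest ih => exact ih _ _ (pvRel_step _ _ h ln)

lemma pvFin_eq (stA : List (List String) × List String)
    (stB : List (List (String × String)) × Option String × List String)
    (h : pvRel stA stB) : pvFinA stA = pvFinB stB := by
  obtain ⟨h1, h2, h3⟩ := h
  rcases stA with ⟨blocks, cur⟩
  rcases stB with ⟨out, t?, parts⟩
  simp only at h1 h2 h3
  rcases cur with _ | ⟨c, cs⟩
  · simp_all [pvFinA, pvFinB]
  · simp only [List.head?] at h2
    subst h1 h2 h3
    simp [pvFinA, pvFinB, pvMkEntryA_cons]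

-- ===== VERDICT (by name: the statement is the Claim_ definition above) =====
theorem split_experience_blocks_py_spec : Claim_equal_split_experience_blocks_py := by
  intro lines _
  show split_experience_blocks_py lines = split_experience_blocks_py_alt lines
  have key : pvFinA (lines.foldl pvStepA ([], [])) = pvFinB (lines.foldl pvStepB ([], none, [])) :=
    pvFin_eq _ _ (pvRel_foldl lines _ _ (by simp [pvRel]))
  by_cases hl : lines = []
  · subst hl; rfl
  · simpa [split_experience_blocks_py, split_experience_blocks_py_alt, hl] using key
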